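-- pv_equiv track=rewrite | github.com/pt9912/cmake-xray | tests/validate_dot_reports.py | validate_string_escapes
-- ===== SOURCE A (Python) =====
-- EXIT_OK = 0
--
-- EXIT_VALIDATION_FAILED = 1
--
-- def validate_string_escapes(text: str) -> tuple[int, str | None]:
--     # Inside quoted strings, every literal control character must be a
--     # documented escape (\\, \", \n, \r, \t, \xHH). Raw control characters are
--     # contract violations.
--     in_string = False
--     prev_char = ""
--     for index, ch in enumerate(text):
--         if in_string:
--             if ch == '"' and prev_char != "\\":
--                 in_string = False
--             elif ord(ch) < 0x20:
--                 return EXIT_VALIDATION_FAILED, (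
--                     f"raw control character (0x{ord(ch):02X}) inside quoted string at offset {index}")
--         else:
--             if ch == '"':
--                 in_string = True
--         prev_char = ch
--     return EXIT_OK, None
-- ===== SOURCE B (Python) =====
-- EXIT_OK = 0
--
-- EXIT_VALIDATION_FAILED = 1
--
--
-- def validate_string_escapes(text: str) -> tuple[int, str | None]:
--     # Pass 1: table of the in-string state at entry to each index.
--     # The closing rule is literally "previous char is not a backslash"
--     # (same as A); opening is unconditional.
--     inside = []
--     state = False
--     prev = None
--     for ch in text:
--         inside.append(state)
--         if ch == '"' and (not state or prev != "\\"):
--             state = not state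
--         prev = ch
--     # Pass 2: first control character that sits inside a string.
--     for i, ch in enumerate(text):
--         if inside[i] and ord(ch) < 0x20:
--             return EXIT_VALIDATION_FAILED, (
--                 "raw control character (0x%02X) inside quoted string at offset %d" % (ord(ch), i))
--     return EXIT_OK, None
-- ===== Notes on version B (the rewrite author's own statement) =====
-- stated objective: alternative
-- what changed: B separates the work into two passes: it first precomputes a boolean table of the in-string state at every index (single toggle rule instead of A's branching state machine with early return), then scans that table for the first control character, while A interleaves state tracking and validation in one loop with an early return.
import Mathlib
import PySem

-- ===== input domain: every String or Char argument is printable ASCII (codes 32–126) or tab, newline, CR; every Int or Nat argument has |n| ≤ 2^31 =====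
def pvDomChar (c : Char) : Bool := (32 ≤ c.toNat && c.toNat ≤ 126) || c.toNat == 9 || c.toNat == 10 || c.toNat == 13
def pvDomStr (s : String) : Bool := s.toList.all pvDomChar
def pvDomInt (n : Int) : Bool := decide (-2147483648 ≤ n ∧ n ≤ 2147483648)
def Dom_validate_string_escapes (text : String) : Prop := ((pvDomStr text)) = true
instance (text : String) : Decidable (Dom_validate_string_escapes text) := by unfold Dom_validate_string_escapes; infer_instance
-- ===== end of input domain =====

-- B restructures A's single loop into two passes (precomputed in-string table, then a scan); same cost, no behavioural change.

-- shared message formatter (f"raw control character (0x{ord:02X}) inside quoted string at offset {index}")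
def pvHexDigit (n : Nat) : Char :=
  if n < 10 then Char.ofNat (48 + n) else Char.ofNat (55 + n)

def pvCtrlMsg (c : Char) (i : Int) : String :=
  "raw control character (0x" ++ String.ofList [pvHexDigit (c.toNat / 16), pvHexDigit (c.toNat % 16)]
    ++ ") inside quoted string at offset " ++ PySem.Int.toStr i

-- ===== PORT A =====
-- one loop: in_string / prev_char state machine with early return
def vseA : List Char → Int → Bool → String → Int × Option String
  | [], _, _, _ => (0, none)
  | ch :: rest, i, inStr, prev =>
    if inStr then
      if ch = '"' ∧ prev ≠ "\\" then
        vseA rest (i + 1) false (String.ofList [ch])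
      else if ch.toNat < 0x20 then
        (1, some (pvCtrlMsg ch i))
      else
        vseA rest (i + 1) true (String.ofList [ch])
    else
      if ch = '"' then
        vseA rest (i + 1) true (String.ofList [ch])
      else
        vseA rest (i + 1) false (String.ofList [ch])

def validate_string_escapes (text : String) : Int × Option String :=
  vseA text.toList 0 false ""

-- ===== PORT B =====
-- pass 1: in-string state at entry to each index (single toggle rule)
def vseInside : List Char → Bool → Option Char → List Bool
  | [], _, _ => []
  | ch :: rest, state, prev =>
    state :: vseInside rest
      (if ch = '"' ∧ (state = false ∨ prev ≠ some '\\') then !state else state)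
      (some ch)

-- pass 2: first control character whose table entry says "inside"
def vseScan : List Bool → List Char → Int → Int × Option String
  | b :: bs, ch :: cs, i =>
    if b ∧ ch.toNat < 0x20 then (1, some (pvCtrlMsg ch i))
    else vseScan bs cs (i + 1)
  | _, _, _ => (0, none)

def validate_string_escapes_alt (text : String) : Int × Option String :=
  vseScan (vseInside text.toList false none) text.toList 0

-- ===== PRECONDITION & SPEC =====
def Spec_validate_string_escapes (text : String) (out : Int × Option String) : Prop := out = validate_string_escapes_alt text
instance (text : String) (out : Int × Option String) : Decidable (Spec_validate_string_escapes text out) := by unfold Spec_validate_string_escapes; infer_instance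

-- ===== CLAIM (what is proved, stated in full; the proofs are below) =====
def Claim_equal_validate_string_escapes : Prop := ∀ (text : String), Dom_validate_string_escapes text → Spec_validate_string_escapes text (validate_string_escapes text)

-- ===== LEMMAS AND PROOFS =====

-- the loop invariant: A's one-pass machine equals B's table-then-scan,
-- provided A's prev string and B's prev option denote the same character
theorem ofList_slash (ch : Char) : (String.ofList [ch] = "\\") ↔ ch = '\\' := by
  constructor
  · intro h
    have h2 := congrArg String.toList h
    simpa using h2
  · intro h; subst h; rfl

theorem vseA_eq_scan (cs : List Char) :
    ∀ (i : Int) (st : Bool) (pa : String) (pb : Option Char),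
      ((pa = "\\") ↔ (pb = some '\\')) →
      vseA cs i st pa = vseScan (vseInside cs st pb) cs i := by
  induction cs with
  | nil => intro i st pa pb _; rfl
  | cons ch rest ih =>
    intro i st pa pb hrel
    have hrel' : ((String.ofList [ch] = "\\") ↔ ((some ch : Option Char) = some '\\')) := by
      simp [ofList_slash]
    cases st with
    | false =>
      by_cases hq : ch = '"'
      · subst hq
        simpa [vseA, vseInside, vseScan] using
          ih (i+1) true (String.ofList ['"']) (some '"') (by decide)
      · simpa [vseA, vseInside, vseScan, hq] using
          ih (i+1) false (String.ofList [ch]) (some ch) hrel'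
    | true =>
      by_cases hq : ch = '"'
      · subst hq
        by_cases hp : pa = "\\"
        · have hpb : pb = some '\\' := hrel.mp hp
          subst hpb
          simpa [vseA, vseInside, vseScan, hp] using
            ih (i+1) true (String.ofList ['"']) (some '"') (by decide)
        · have hpb : pb ≠ some '\\' := fun h => hp (hrel.mpr h)
          simpa [vseA, vseInside, vseScan, hp, hpb] using
            ih (i+1) false (String.ofList ['"']) (some '"') (by decide)
      · by_cases hc : ch.toNat < 0x20
        · simp [vseA, vseInside, vseScan, hq, hc]
        · simpa [vseA, vseInside, vseScan, hq, hc] using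
            ih (i+1) true (String.ofList [ch]) (some ch) hrel'

-- ===== VERDICT (by name: the statement is the Claim_ definition above) =====
theorem validate_string_escapes_spec : Claim_equal_validate_string_escapes := by
  intro text _
  unfold Spec_validate_string_escapes validate_string_escapes validate_string_escapes_alt
  exact vseA_eq_scan text.toList 0 false "" none (by simp)
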